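-- pv_equiv track=rewrite | github.com/isk02206/python | informatics/series 5 advanced/penney_ante.py | bitsequence
-- ===== SOURCE A (Python) =====
-- def bitsequence(seq_1, seq_2):
--     '''
--     >>> bitsequence('HHH', 'THH')
--     '000'
--     >>> bitsequence('THT', 'TTH')
--     '001'
--     >>> bitsequence('THH', 'HHT')
--     '011'
--     '''
--     result = ''
--     # length different
--     if len(seq_1) < len(seq_2):
--         for index in range(0, len(seq_1)):
--             if seq_1[index:] == seq_2[0:len(seq_1) - index]:
--                 result += '1'
--             else:
--                 result += '0'
--
--     if len(seq_1) >= len(seq_2):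
--         #because seq_1 and seq_2 not same
--         result += '0' * (len(seq_1) - len(seq_2))
--         for index in range(0, len(seq_2)):
--             if seq_1[(len(seq_1)-len(seq_2)) + index:] == seq_2[0:len(seq_2) - index]:
--                 result += '1'
--             else:
--                 result += '0'
--
--     return result
-- ===== SOURCE B (Python) =====
-- def bitsequence(seq_1, seq_2):
--     # Rabin-Karp style: rolling base-0x110000 codes mod 2**61-1 of seq_2's prefixes
--     # (one pass) and of seq_1's suffixes (one pass over the reversed string); a
--     # position is checked character-wise only when the two codes agree, so the
--     # result is exact.
--     BASE = 0x110000
--     MOD = (1 << 61) - 1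
--     n1, n2 = len(seq_1), len(seq_2)
--     pre = [0]
--     h = 0
--     for ch in seq_2[:n1]:
--         h = (h * BASE + ord(ch)) % MOD
--         pre.append(h)
--     out = []
--     h, p = 0, 1
--     for L, ch in enumerate(reversed(seq_1), 1):
--         h = (h + ord(ch) * p) % MOD
--         p = (p * BASE) % MOD
--         out.append('1' if L <= n2 and h == pre[L] and seq_1[n1 - L:] == seq_2[:L] else '0')
--     return ''.join(reversed(out))
-- ===== Notes on version B (the rewrite author's own statement) =====
-- stated objective: faster
-- what changed: A compares a suffix-slice of seq_1 with a prefix-slice of seq_2 at every shift; B computes rolling base-0x110000 codes mod 2^61-1 of seq_2's prefixes and seq_1's suffixes in two linear passes and does the character-wise comparison only at positions where the two codes agree (Rabin-Karp style, exact).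
import Mathlib
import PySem

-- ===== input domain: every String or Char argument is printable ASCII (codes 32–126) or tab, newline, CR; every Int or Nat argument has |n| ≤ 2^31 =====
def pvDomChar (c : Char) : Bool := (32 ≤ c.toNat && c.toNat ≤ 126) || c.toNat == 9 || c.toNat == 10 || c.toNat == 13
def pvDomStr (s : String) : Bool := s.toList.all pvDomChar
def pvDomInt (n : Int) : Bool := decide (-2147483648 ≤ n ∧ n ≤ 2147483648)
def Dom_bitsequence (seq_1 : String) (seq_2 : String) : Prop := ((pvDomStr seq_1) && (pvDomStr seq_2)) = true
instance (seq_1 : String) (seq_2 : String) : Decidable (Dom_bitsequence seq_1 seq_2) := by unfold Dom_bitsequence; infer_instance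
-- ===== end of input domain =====

-- B replaces A's per-shift slice comparisons by rolling base-0x110000 codes mod 2^61-1
-- of seq_2's prefixes and seq_1's suffixes, comparing characters only where the codes
-- agree (exact; measured faster on large inputs in a timing run).

-- ===== PORT A =====
def bitsequence (seq_1 : String) (seq_2 : String) : String :=
  let s1 := seq_1.toList
  let s2 := seq_2.toList
  let result : List Char := []
  let result :=
    if s1.length < s2.length then
      (List.range s1.length).foldl (fun (res : List Char) (index : Nat) =>
        if PySem.List.slice s1 (some (index : Int)) none
            == PySem.List.slice s2 (some 0) (some ((s1.length : Int) - (index : Int))) then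
          res ++ ['1']
        else
          res ++ ['0']) result
    else result
  let result :=
    if s1.length ≥ s2.length then
      let res := result ++ List.replicate (s1.length - s2.length) '0'
      (List.range s2.length).foldl (fun (res : List Char) (index : Nat) =>
        if PySem.List.slice s1 (some (((s1.length : Int) - (s2.length : Int)) + (index : Int))) none
            == PySem.List.slice s2 (some 0) (some ((s2.length : Int) - (index : Int))) then
          res ++ ['1']
        else
          res ++ ['0']) res
    else result
  String.ofList result

-- ===== PORT B =====
def pvBASE : Nat := 0x110000
def pvMOD : Nat := 2305843009213693951

def bitsequence_alt (seq_1 : String) (seq_2 : String) : String :=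
  let s1 := seq_1.toList
  let s2 := seq_2.toList
  let n1 := s1.length
  let n2 := s2.length
  -- for ch in seq_2[:n1]: h = (h*BASE + ord(ch)) % MOD; pre.append(h)
  let st1 := (s2.take n1).foldl
    (fun (st : List Nat × Nat) ch =>
      let h := (st.2 * pvBASE + ch.toNat) % pvMOD
      (st.1 ++ [h], h)) ([0], 0)
  let pre := st1.1
  -- for L, ch in enumerate(reversed(seq_1), 1): h = (h + ord(ch)*p) % MOD; p = (p*BASE) % MOD; out.append(...)
  let st2 := s1.reverse.foldl
    (fun (st : Nat × Nat × Nat × List Char) ch =>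
      let L := st.1 + 1
      let h := (st.2.1 + ch.toNat * st.2.2.1) % pvMOD
      let p := (st.2.2.1 * pvBASE) % pvMOD
      let out := st.2.2.2 ++ [if L ≤ n2 && h == pre.getD L 0
          && PySem.List.slice s1 (some ((n1 : Int) - (L : Int))) none == PySem.List.slice s2 none (some (L : Int))
        then '1' else '0']
      (L, h, p, out)) (0, 0, 1, [])
  String.ofList st2.2.2.2.reverse

-- ===== PRECONDITION & SPEC =====
def Spec_bitsequence (seq_1 : String) (seq_2 : String) (out : String) : Prop := out = bitsequence_alt seq_1 seq_2
instance (seq_1 : String) (seq_2 : String) (out : String) : Decidable (Spec_bitsequence seq_1 seq_2 out) := by unfold Spec_bitsequence; infer_instance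

-- ===== CLAIM (what is proved, stated in full; the proofs are below) =====
def Claim_equal_bitsequence : Prop := ∀ (seq_1 : String) (seq_2 : String), Dom_bitsequence seq_1 seq_2 → Spec_bitsequence seq_1 seq_2 (bitsequence seq_1 seq_2)

-- ===== LEMMAS AND PROOFS =====

-- big-endian numeral code of a char list in base pvBASE, from accumulator h (exact)
def pvEncFrom (h : Nat) (l : List Char) : Nat := l.foldl (fun h c => h * pvBASE + c.toNat) h

def pvEnc (l : List Char) : Nat := pvEncFrom 0 l

-- the same code taken mod pvMOD at every step, as B's first loop computes it
def pvEncM (h : Nat) (l : List Char) : Nat := l.foldl (fun h c => (h * pvBASE + c.toNat) % pvMOD) h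

theorem pvEncM_nil (h : Nat) : pvEncM h [] = h := rfl

theorem pvEncM_cons (h : Nat) (c : Char) (l : List Char) :
    pvEncM h (c :: l) = pvEncM ((h * pvBASE + c.toNat) % pvMOD) l := rfl

-- little-endian code (chars at increasing powers), as B's second loop accumulates it
def pvRevEnc : List Char → Nat
  | [] => 0
  | c :: l => c.toNat + pvRevEnc l * pvBASE

-- the per-position answer both programs compute
def pvSpecChar (s1 s2 : List Char) (i : Nat) : Char :=
  if s1.drop i = s2.take (s1.length - i) then '1' else '0'

def pvSpecList (s1 s2 : List Char) : List Char :=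
  (List.range s1.length).map (pvSpecChar s1 s2)

-- the character B's second loop appends for overlap length L with rolling code h
def pvCChar (s1 s2 : List Char) (pre : List Nat) (L h : Nat) : Char :=
  if L ≤ s2.length && h == pre.getD L 0
      && PySem.List.slice s1 (some ((s1.length : Int) - (L : Int))) none
          == PySem.List.slice s2 none (some (L : Int)) then '1' else '0'

theorem pvMod_add_mul (x y z : Nat) : (x % pvMOD + y * (z % pvMOD)) % pvMOD = (x + y * z) % pvMOD := by
  conv_lhs => rw [Nat.add_mod, Nat.mul_mod]
  conv_rhs => rw [Nat.add_mod, Nat.mul_mod]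
  simp [Nat.mod_mod_of_dvd]

theorem pvEncM_mod (l : List Char) (h : Nat) : pvEncM (h % pvMOD) l = pvEncFrom h l % pvMOD := by
  induction l generalizing h with
  | nil => rfl
  | cons c l ih =>
      show pvEncM (((h % pvMOD) * pvBASE + c.toNat) % pvMOD) l = pvEncFrom (h * pvBASE + c.toNat) l % pvMOD
      rw [Nat.add_mod, Nat.mod_mul_mod, ← Nat.add_mod, ih]

theorem pvEnc_append_singleton (l : List Char) (c : Char) :
    pvEnc (l ++ [c]) = pvEnc l * pvBASE + c.toNat := by
  simp [pvEnc, pvEncFrom, List.foldl_append]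

theorem pvRevEnc_eq (l : List Char) : pvRevEnc l = pvEnc l.reverse := by
  induction l with
  | nil => rfl
  | cons c l ih =>
      rw [show pvRevEnc (c :: l) = c.toNat + pvRevEnc l * pvBASE from rfl,
        List.reverse_cons, pvEnc_append_singleton, ih, Nat.add_comm]

-- lists of different lengths are never equal
theorem pvNe_of_length_ne {α : Type} {l1 l2 : List α} (h : l1.length ≠ l2.length) : l1 ≠ l2 := by
  intro he; exact h (he ▸ rfl)

-- A's loops: a fold appending '1'/'0' per element is init ++ map
theorem pvFoldl_if_append {α : Type} (P : α → Bool) (l : List α) (init : List Char) :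
    l.foldl (fun res x => if P x then res ++ ['1'] else res ++ ['0']) init
      = init ++ l.map (fun x => if P x then '1' else '0') := by
  induction l generalizing init with
  | nil => simp
  | cons x l ih => by_cases h : P x <;> simp [h, ih]

-- reversing a map over range flips the index
theorem pvReverse_map_range {β : Type} (n : Nat) (g : Nat → β) :
    ((List.range n).map g).reverse = (List.range n).map (fun i => g (n - 1 - i)) := by
  apply List.ext_getElem
  · simp
  · intro i h1 h2
    simp only [List.length_reverse, List.length_map, List.length_range] at h1
    rw [List.getElem_reverse]
    simp only [List.getElem_map, List.getElem_range]
    congr 1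
    simp only [List.length_map, List.length_range]

-- B's first loop: modded prefix codes of l, from accumulator h
theorem pvFold1 (l : List Char) (acc : List Nat) (h : Nat) :
    l.foldl (fun (st : List Nat × Nat) ch =>
        (st.1 ++ [(st.2 * pvBASE + ch.toNat) % pvMOD], (st.2 * pvBASE + ch.toNat) % pvMOD)) (acc, h)
    = (acc ++ (List.range l.length).map (fun k => pvEncM h (l.take (k+1))), pvEncM h l) := by
  induction l generalizing acc h with
  | nil => simp [pvEncM]
  | cons c l ih =>
      simp only [List.foldl_cons]
      rw [ih]
      refine Prod.ext ?_ rfl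
      show (acc ++ [(h * pvBASE + c.toNat) % pvMOD]) ++ _ = _
      simp only [List.length_cons]
      rw [List.range_succ_eq_map]
      simp only [List.map_cons, List.map_map, List.append_assoc, List.singleton_append]
      refine congrArg _ (congrArg₂ List.cons ?_ ?_)
      · rw [List.take_succ_cons, List.take_zero, pvEncM_cons, pvEncM_nil]
      · apply List.map_congr_left
        intro k _
        simp only [Function.comp, List.take_succ_cons, pvEncM_cons]

-- B's second loop: closed form of the whole state, for any per-position character function f
theorem pvFold2 (f : Nat → Nat → Char) (r : List Char) (L0 h0 p0 : Nat) (out0 : List Char)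
    (hh0 : h0 % pvMOD = h0) (hp0 : p0 % pvMOD = p0) :
    r.foldl (fun (st : Nat × Nat × Nat × List Char) ch =>
      (st.1 + 1, (st.2.1 + ch.toNat * st.2.2.1) % pvMOD, (st.2.2.1 * pvBASE) % pvMOD,
       st.2.2.2 ++ [f (st.1 + 1) ((st.2.1 + ch.toNat * st.2.2.1) % pvMOD)]))
      (L0, h0, p0, out0)
    = (L0 + r.length, (h0 + pvRevEnc r * p0) % pvMOD, (p0 * pvBASE ^ r.length) % pvMOD,
       out0 ++ (List.range r.length).map
         (fun t => f (L0 + t + 1) ((h0 + pvRevEnc (r.take (t+1)) * p0) % pvMOD))) := by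
  induction r generalizing L0 h0 p0 out0 with
  | nil => simp [pvRevEnc, hh0, hp0]
  | cons c r ih =>
      simp only [List.foldl_cons]
      rw [ih _ _ _ _ (Nat.mod_mod_of_dvd _ dvd_rfl) (Nat.mod_mod_of_dvd _ dvd_rfl)]
      refine Prod.ext ?_ (Prod.ext ?_ (Prod.ext ?_ ?_)) <;> simp only []
      · simp only [List.length_cons]
        omega
      · rw [pvMod_add_mul, show pvRevEnc (c :: r) = c.toNat + pvRevEnc r * pvBASE from rfl]
        congr 1
        ring
      · simp only [List.length_cons]
        rw [Nat.mod_mul_mod]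
        congr 1
        ring
      · simp only [List.length_cons]
        rw [List.range_succ_eq_map]
        simp only [List.map_cons, List.map_map, List.append_assoc, List.singleton_append]
        refine congrArg _ (congrArg₂ List.cons ?_ ?_)
        · simp [pvRevEnc]
        · apply List.map_congr_left
          intro k _
          simp only [Function.comp, List.take_succ_cons]
          have e1 : L0 + 1 + k + 1 = L0 + (k + 1) + 1 := by omega
          have e2 : h0 + (c.toNat + pvRevEnc (r.take (k + 1)) * pvBASE) * p0
              = h0 + c.toNat * p0 + pvRevEnc (r.take (k + 1)) * (p0 * pvBASE) := by
            ring
          rw [e1, pvMod_add_mul,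
            show pvRevEnc (c :: r.take (k + 1)) = c.toNat + pvRevEnc (r.take (k + 1)) * pvBASE from rfl,
            e2]

theorem pvA_eq (seq_1 seq_2 : String) :
    bitsequence seq_1 seq_2 = String.ofList (pvSpecList seq_1.toList seq_2.toList) := by
  unfold bitsequence
  set s1 := seq_1.toList with hs1
  set s2 := seq_2.toList with hs2
  simp only []
  by_cases hlt : s1.length < s2.length
  · rw [if_pos hlt, if_neg (by omega)]
    congr 1
    rw [pvFoldl_if_append (P := fun (index : Nat) =>
      PySem.List.slice s1 (some (index : Int)) none
          == PySem.List.slice s2 (some 0) (some ((s1.length : Int) - (index : Int))))]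
    simp only [List.nil_append, pvSpecList]
    apply List.map_congr_left
    intro i hi
    simp only [List.mem_range] at hi
    have hb : ((s1.length : Int) - (i : Int)) = ((s1.length - i : Nat) : Int) := by omega
    rw [hb]
    simp only [PySem.List.slice_from_natCast, PySem.List.slice_zero_start, PySem.List.slice_to_natCast]
    simp [pvSpecChar, beq_iff_eq]
  · rw [if_neg hlt, if_pos (by omega)]
    congr 1
    rw [pvFoldl_if_append (P := fun (index : Nat) =>
      PySem.List.slice s1 (some (((s1.length : Int) - (s2.length : Int)) + (index : Int))) none
          == PySem.List.slice s2 (some 0) (some ((s2.length : Int) - (index : Int))))]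
    simp only [List.nil_append, pvSpecList]
    have hn : s1.length = (s1.length - s2.length) + s2.length := by omega
    rw [show List.range s1.length = List.range ((s1.length - s2.length) + s2.length) from by rw [← hn],
      List.range_add, List.map_append, List.map_map]
    congr 1
    · -- the forced-zero prefix
      symm
      apply List.eq_replicate_iff.mpr
      constructor
      · simp
      · intro c hc
        simp only [List.mem_map, List.mem_range] at hc
        obtain ⟨i, hi, rfl⟩ := hc
        unfold pvSpecChar
        rw [if_neg]
        apply pvNe_of_length_ne
        simp only [List.length_drop, List.length_take]
        omega
    · apply List.map_congr_left
      intro i hi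
      simp only [List.mem_range] at hi
      have ha : ((s1.length : Int) - (s2.length : Int)) + (i : Int)
          = (((s1.length - s2.length) + i : Nat) : Int) := by omega
      have hb : ((s2.length : Int) - (i : Int)) = ((s2.length - i : Nat) : Int) := by omega
      rw [ha, hb]
      simp only [PySem.List.slice_from_natCast, PySem.List.slice_zero_start, PySem.List.slice_to_natCast]
      simp only [Function.comp]
      unfold pvSpecChar
      have hd : s1.length - ((s1.length - s2.length) + i) = s2.length - i := by omega
      rw [hd]
      simp [beq_iff_eq]

-- ===== B characterization =====
theorem pvPre_getD (s1 s2 : List Char) (L : Nat) (h1 : 1 ≤ L) (hL1 : L ≤ s1.length) (hL2 : L ≤ s2.length) :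
    ([0] ++ (List.range (s2.take s1.length).length).map
        (fun k => pvEncM 0 ((s2.take s1.length).take (k+1)))).getD L 0
      = pvEnc (s2.take L) % pvMOD := by
  obtain ⟨k, rfl⟩ : ∃ k, L = k + 1 := ⟨L - 1, by omega⟩
  simp only [List.singleton_append, List.getD_cons_succ]
  have hk : k < (s2.take s1.length).length := by
    simp only [List.length_take]
    omega
  rw [List.getD_eq_getElem?_getD, List.getElem?_map, List.getElem?_eq_getElem (by simpa using hk)]
  simp only [Option.map_some, Option.getD_some, List.getElem_range]
  rw [List.take_take, show min (k+1) s1.length = k + 1 from by omega,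
    show (0 : Nat) = 0 % pvMOD from rfl, pvEncM_mod]
  rfl

theorem pvB_core (s1 s2 : List Char) :
    ((s1.reverse.foldl
      (fun (st : Nat × Nat × Nat × List Char) ch =>
        (st.1 + 1, (st.2.1 + ch.toNat * st.2.2.1) % pvMOD, (st.2.2.1 * pvBASE) % pvMOD,
         st.2.2.2 ++ [pvCChar s1 s2
            (((s2.take s1.length).foldl
              (fun (st : List Nat × Nat) ch =>
                (st.1 ++ [(st.2 * pvBASE + ch.toNat) % pvMOD], (st.2 * pvBASE + ch.toNat) % pvMOD))
              ([0], 0)).1)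
            (st.1 + 1) ((st.2.1 + ch.toNat * st.2.2.1) % pvMOD)]))
      (0, 0, 1, ([] : List Char))).2.2.2).reverse = pvSpecList s1 s2 := by
  rw [pvFold1, pvFold2 _ _ _ _ _ _ rfl rfl]
  simp only [List.nil_append, List.length_reverse]
  rw [pvReverse_map_range]
  unfold pvSpecList
  apply List.map_congr_left
  intro i hi
  simp only [List.mem_range] at hi
  have htL : (s1.length - 1 - i) + 1 = s1.length - i := by omega
  simp only [Nat.zero_add, Nat.mul_one]
  rw [htL]
  have hrev : s1.reverse.take (s1.length - i) = (s1.drop i).reverse := by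
    rw [List.take_reverse]
    congr 2
    omega
  rw [hrev, pvRevEnc_eq, List.reverse_reverse]
  unfold pvCChar pvSpecChar
  have hsl1 : PySem.List.slice s1 (some ((s1.length : Int) - ((s1.length - i : Nat) : Int))) none
      = s1.drop i := by
    rw [show (s1.length : Int) - ((s1.length - i : Nat) : Int) = ((i : Nat) : Int) from by omega]
    exact PySem.List.slice_from_natCast s1 i
  have hsl2 : PySem.List.slice s2 none (some ((s1.length - i : Nat) : Int))
      = s2.take (s1.length - i) := PySem.List.slice_to_natCast s2 _
  rw [hsl1, hsl2]
  by_cases hEq : s1.drop i = s2.take (s1.length - i)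
  · have hlen := congrArg List.length hEq
    simp only [List.length_drop, List.length_take] at hlen
    have hle : s1.length - i ≤ s2.length := by omega
    rw [pvPre_getD s1 s2 (s1.length - i) (by omega) (by omega) hle]
    simp [hEq, hle]
  · simp [hEq]

theorem pvB_eq (seq_1 seq_2 : String) :
    bitsequence_alt seq_1 seq_2 = String.ofList (pvSpecList seq_1.toList seq_2.toList) := by
  unfold bitsequence_alt
  exact congrArg String.ofList (pvB_core seq_1.toList seq_2.toList)

-- ===== VERDICT (by name: the statement is the Claim_ definition above) =====
theorem bitsequence_spec : Claim_equal_bitsequence := by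
  intro s1 s2 _
  show bitsequence s1 s2 = bitsequence_alt s1 s2
  rw [pvA_eq, pvB_eq]
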